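-- pv_equiv track=rewrite | github.com/loschmidt/vae-dehalogenases | vae_our_approach/devel_LL/experiment_handler.py | query_indels_and_substitution
-- ===== SOURCE A (Python) =====
-- def query_indels_and_substitution(seq, query):
--     """ Determines how many indels were added to WT and these positions keep in list """
--     indels_list = []
--     substitution_list = []
--     gaps_vec = [p != '-' for p in query]
--     wt_positions = [sum(gaps_vec[:prefix + 1]) for prefix in range(len(query))]
--     for pos, (seq_char, query_char) in enumerate(zip(seq, query)):
--         if seq_char != query_char:
--             if query_char == '-':
--                 indels_list.append("ins{}{}".format(wt_positions[pos], seq_char))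
--             elif seq_char == '-':
--                 indels_list.append("del{}{}".format(wt_positions[pos], query_char))
--             else:  # Substitution occurs
--                 substitution_list.append("{}{}{}".format(query_char, wt_positions[pos], seq_char))
--     return substitution_list, indels_list
-- ===== SOURCE B (Python) =====
-- def query_indels_and_substitution(seq, query):
--     """ Determines how many indels were added to WT and these positions keep in list """
--     substitution_list = []
--     indels_list = []
--     wt = 0  # running count of non-gap query positions seen so far (prefix sum)
--     for seq_char, query_char in zip(seq, query):
--         if query_char != '-':
--             wt += 1
--         if seq_char != query_char:
--             if query_char == '-':
--                 indels_list.append("ins{}{}".format(wt, seq_char))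
--             elif seq_char == '-':
--                 indels_list.append("del{}{}".format(wt, query_char))
--             else:
--                 substitution_list.append("{}{}{}".format(query_char, wt, seq_char))
--     return substitution_list, indels_list
-- ===== Notes on version B (the rewrite author's own statement) =====
-- stated objective: faster
-- what changed: Replaces the precomputed wt_positions table, whose every entry re-sums a whole prefix of the gap vector (quadratic), by a single running prefix-sum counter maintained inside one pass over the zipped sequences.
import Mathlib
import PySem

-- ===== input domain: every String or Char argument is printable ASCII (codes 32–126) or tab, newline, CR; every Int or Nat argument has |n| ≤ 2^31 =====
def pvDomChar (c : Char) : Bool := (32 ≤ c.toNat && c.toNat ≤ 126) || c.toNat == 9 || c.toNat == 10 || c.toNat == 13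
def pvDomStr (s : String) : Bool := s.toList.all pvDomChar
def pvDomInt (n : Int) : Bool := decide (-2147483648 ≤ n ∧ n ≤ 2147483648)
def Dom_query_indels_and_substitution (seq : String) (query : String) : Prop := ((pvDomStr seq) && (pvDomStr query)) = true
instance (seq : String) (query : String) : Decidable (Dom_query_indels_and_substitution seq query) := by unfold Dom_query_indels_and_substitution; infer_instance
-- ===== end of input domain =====

-- B replaces A's quadratic per-position prefix re-summation (wt_positions table) by a single
-- running counter in one pass; return value only, no mutation.

-- ===== PORT A =====
-- gaps_vec = [p != '-' for p in query]
def pvGaps (query : List Char) : List Bool := query.map (fun p => p != '-')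

-- wt_positions = [sum(gaps_vec[:prefix + 1]) for prefix in range(len(query))]
-- (Python sums booleans as ints; the slice [:prefix+1] with prefix+1 ≥ 0 is `take`.)
def pvWtPositions (query : List Char) : List Int :=
  (List.range query.length).map
    (fun pre => (((pvGaps query).take (pre + 1)).map (fun b => if b then (1 : Int) else 0)).sum)

-- the body of A's for-loop; wt_positions[pos]: pos is the enumerate index, always in range,
-- ported with pyGetD (default never used).
def pvStepA (wtp : List Int) (st : List String × List String) (e : Int × (Char × Char)) :
    List String × List String :=
  let pos := e.1; let sc := e.2.1; let qc := e.2.2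
  if sc ≠ qc then
    if qc = '-' then
      (st.1, st.2 ++ ["ins" ++ PySem.Int.toStr (PySem.List.pyGetD wtp pos 0) ++ sc.toString])
    else if sc = '-' then
      (st.1, st.2 ++ ["del" ++ PySem.Int.toStr (PySem.List.pyGetD wtp pos 0) ++ qc.toString])
    else
      (st.1 ++ [qc.toString ++ PySem.Int.toStr (PySem.List.pyGetD wtp pos 0) ++ sc.toString], st.2)
  else st

def query_indels_and_substitution (seq : String) (query : String) : List String × List String :=
  let wtp := pvWtPositions query.toList
  (PySem.List.enumerate (seq.toList.zip query.toList) 0).foldl (pvStepA wtp) ([], [])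

-- ===== PORT B =====
-- B's single pass: running counter wt, incremented when query_char != '-'.
def pvAltLoop : List (Char × Char) → Int → List String → List String → List String × List String
  | [], _, subs, indels => (subs, indels)
  | (sc, qc) :: rest, wt, subs, indels =>
    let wt' := if qc ≠ '-' then wt + 1 else wt
    if sc ≠ qc then
      if qc = '-' then
        pvAltLoop rest wt' subs (indels ++ ["ins" ++ PySem.Int.toStr wt' ++ sc.toString])
      else if sc = '-' then
        pvAltLoop rest wt' subs (indels ++ ["del" ++ PySem.Int.toStr wt' ++ qc.toString])
      else
        pvAltLoop rest wt' (subs ++ [qc.toString ++ PySem.Int.toStr wt' ++ sc.toString]) indels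
    else pvAltLoop rest wt' subs indels

def query_indels_and_substitution_alt (seq : String) (query : String) : List String × List String :=
  pvAltLoop (seq.toList.zip query.toList) 0 [] []

-- ===== PRECONDITION & SPEC =====
def Spec_query_indels_and_substitution (seq : String) (query : String) (out : List String × List String) : Prop := out = query_indels_and_substitution_alt seq query
instance (seq : String) (query : String) (out : List String × List String) : Decidable (Spec_query_indels_and_substitution seq query out) := by unfold Spec_query_indels_and_substitution; infer_instance

-- ===== CLAIM (what is proved, stated in full; the proofs are below) =====
def Claim_equal_query_indels_and_substitution : Prop := ∀ (seq : String) (query : String), Dom_query_indels_and_substitution seq query → Spec_query_indels_and_substitution seq query (query_indels_and_substitution seq query)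

-- ===== LEMMAS AND PROOFS =====

-- counting non-gap second components of zipped pairs = counting non-gap chars of the query prefix
theorem pv_count_zip (a : List Char) : ∀ (b : List Char) (j : Nat), j < (a.zip b).length →
    ((a.zip b).take (j + 1)).countP (fun p => p.2 != '-')
      = (b.take (j + 1)).countP (fun c => c != '-') := by
  induction a with
  | nil => intro b j hj; simp at hj
  | cons x xs ihx =>
    intro b j hj
    cases b with
    | nil => simp at hj
    | cons y ys =>
      cases j with
      | zero => simp [List.countP_cons]
      | succ k =>
        have hk : k < (xs.zip ys).length := by simp at hj ⊢; omega
        simp [List.take_succ_cons, List.countP_cons, ihx ys k hk]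

-- the table entry j is the count of non-gap query chars among the first j+1 zipped pairs
theorem pv_wtp_entry (a b : List Char) (j : Nat) (hj : j < (a.zip b).length) :
    PySem.List.pyGetD (pvWtPositions b) ((j : Nat) : Int) 0
      = (((a.zip b).take (j + 1)).countP (fun p => p.2 != '-') : Int) := by
  have hjb : j < b.length := by
    have := List.length_zip (l₁ := a) (l₂ := b); omega
  rw [PySem.List.pyGetD_natCast]
  rw [List.getD_eq_getElem?_getD]
  have hsome : (pvWtPositions b)[j]?
      = some ((((pvGaps b).take (j + 1)).map (fun g => if g then (1 : Int) else 0)).sum) := by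
    unfold pvWtPositions
    rw [List.getElem?_map, List.getElem?_range hjb]
    rfl
  rw [hsome, Option.getD_some]
  have hsum : ∀ (l : List Bool),
      (l.map (fun g => if g then (1 : Int) else 0)).sum = (l.countP id : Int) := by
    intro l
    induction l with
    | nil => simp
    | cons g gs ihg => cases g <;> simp [ihg] <;> try omega
  rw [hsum]
  have h1 : ((pvGaps b).take (j + 1)).countP id = (b.take (j + 1)).countP (fun c => c != '-') := by
    simp [pvGaps, ← List.map_take, List.countP_map]
  rw [h1, pv_count_zip a b j hj]

-- A's loop over `enumerate l i`, looking each position up in the table, equals B's loop with a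
-- running counter wt, provided the table agrees with the running prefix counts.
theorem pv_loop_eq (wtp : List Int) :
    ∀ (l : List (Char × Char)) (i : Nat) (wt : Int) (subs indels : List String),
      (∀ j, j < l.length →
        PySem.List.pyGetD wtp ((i + j : Nat) : Int) 0
          = wt + ((l.take (j + 1)).countP (fun p => p.2 != '-') : Int)) →
      (PySem.List.enumerate l (i : Int)).foldl (pvStepA wtp) (subs, indels)
        = pvAltLoop l wt subs indels := by
  intro l
  induction l with
  | nil => intro i wt subs indels _; simp [PySem.List.enumerate_nil, pvAltLoop]
  | cons hd tl ih =>
    intro i wt subs indels H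
    obtain ⟨sc, qc⟩ := hd
    have h0 : PySem.List.pyGetD wtp ((i : Nat) : Int) 0
        = (if qc ≠ '-' then wt + 1 else wt) := by
      have := H 0 (by simp)
      simp only [Nat.add_zero] at this
      rw [this]
      by_cases hq : qc = '-' <;> simp [List.countP_cons, hq]
    have hrest : ∀ j, j < tl.length →
        PySem.List.pyGetD wtp (((i + 1) + j : Nat) : Int) 0
          = (if qc ≠ '-' then wt + 1 else wt)
            + ((tl.take (j + 1)).countP (fun p => p.2 != '-') : Int) := by
      intro j hj
      have hH := H (j + 1) (by simp; omega)
      have harg : (i + (j + 1)) = ((i + 1) + j) := by omega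
      rw [harg] at hH
      rw [hH]
      by_cases hq : qc = '-' <;>
        simp [List.take_succ_cons, List.countP_cons, hq] <;> push_cast <;> ring
    rw [PySem.List.enumerate_cons, List.foldl_cons]
    have hc : ((i : Int) + 1) = (((i + 1 : Nat)) : Int) := by push_cast; ring
    rw [hc]
    simp only [pvAltLoop, pvStepA]
    simp only [h0]
    by_cases hq : qc = '-' <;>
      simp only [hq, ne_eq, not_true_eq_false, not_false_eq_true, if_true, if_false,
        ite_true, ite_false] <;>
      split_ifs <;>
      exact ih (i + 1) _ _ _ (fun j hj => by simpa [hq] using hrest j hj)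

theorem pv_main (seq query : String) :
    query_indels_and_substitution seq query = query_indels_and_substitution_alt seq query := by
  unfold query_indels_and_substitution query_indels_and_substitution_alt
  have h0 : ((0 : Nat) : Int) = (0 : Int) := rfl
  rw [← h0]
  exact pv_loop_eq _ (seq.toList.zip query.toList) 0 0 [] []
    (fun j hj => by simpa using pv_wtp_entry seq.toList query.toList j hj)

-- ===== VERDICT (by name: the statement is the Claim_ definition above) =====
theorem query_indels_and_substitution_spec : Claim_equal_query_indels_and_substitution := by
  intro seq query _
  unfold Spec_query_indels_and_substitution
  exact pv_main seq query
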